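-- pv_equiv track=rewrite | github.com/MDDAIEXPOSER/algoritmics | algos_23_11_2.py | maxi_generate
-- ===== SOURCE A (Python) =====
-- def maxi_generate(n):
--     if n == 0:
--         return 0
--     else:
--         array = [0] * (n+1)
--         array[1] = 1
--         for i in range(n+1):
--             if i*2 <= n:
--                 array[i*2] = array[i]
--             if i*2 + 1 <= n:
--                 array[i*2+1] = array[i] + array[i+1]
--         return max(array)
-- ===== SOURCE B (Python) =====
-- def maxi_generate(n):
--     def fusc(k):
--         a, b = 1, 0
--         while k > 0:
--             if k % 2 == 1:
--                 b += a
--             else: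
--                 a += b
--             k //= 2
--         return b
--     return max(fusc(i) for i in range(n + 1))
-- ===== Notes on version B (the rewrite author's own statement) =====
-- stated objective: alternative
-- what changed: Replaces the bottom-up doubling recurrence filled into an (n+1)-element array with an independent per-index binary 'fusc' accumulator loop (a,b updated over the bits of each k) and a running max over range(n+1), eliminating the shared array.
import Mathlib
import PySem

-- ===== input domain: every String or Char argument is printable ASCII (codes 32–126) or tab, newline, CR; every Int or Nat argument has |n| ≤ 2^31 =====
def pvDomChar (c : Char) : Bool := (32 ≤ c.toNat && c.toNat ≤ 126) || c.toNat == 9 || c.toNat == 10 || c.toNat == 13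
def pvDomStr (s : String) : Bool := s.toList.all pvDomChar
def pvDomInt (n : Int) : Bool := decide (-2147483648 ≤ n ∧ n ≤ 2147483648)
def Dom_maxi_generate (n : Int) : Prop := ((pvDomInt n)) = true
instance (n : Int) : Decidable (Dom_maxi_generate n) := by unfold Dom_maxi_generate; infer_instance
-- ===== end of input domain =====

-- B replaces A's bottom-up array recurrence by an independent binary "fusc" computation per
-- index and a running max, using no array (objective: alternative, not claimed faster).

-- ===== PORT A =====
-- literal transliteration of A: build array of size n+1, array[1]=1, fill by the doubling
-- recurrence over i in range(n+1), return max(array) ((max?).getD 0: Pre_ makes it nonempty).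
-- the Python list is a dynamic array: Array Int; indices are loop counters i ≥ 0 from
-- range(n+1), both writes are guarded in range, so setIfInBounds/getD/.toNat are exact here
def maxi_generate (n : Int) : Int :=
  if n = 0 then 0
  else
    let array : Array Int := Array.replicate (n + 1).toNat 0
    let array := array.setIfInBounds 1 1
    let array := (PySem.List.pyRange 0 (n + 1) 1).foldl (fun arr i =>
      let arr := if i * 2 ≤ n then
          arr.setIfInBounds (i * 2).toNat (arr.getD i.toNat 0) else arr
      if i * 2 + 1 ≤ n then
          arr.setIfInBounds (i * 2 + 1).toNat
            (arr.getD i.toNat 0 + arr.getD (i + 1).toNat 0) else arr) array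
    (PySem.List.max? array.toList (fun x => x)).getD 0

-- ===== PORT B =====
-- B's helper fusc(k): a,b = 1,0; while k>0: if k odd then b+=a else a+=b; k//=2; return b.
-- k is a nonnegative loop index, so the while loop is structural recursion on the Nat value.
def fuscGo : Nat → Int → Int → Int
  | 0, _, b => b
  | (k + 1), a, b =>
      if (k + 1) % 2 = 1 then fuscGo ((k + 1) / 2) a (b + a)
      else fuscGo ((k + 1) / 2) (a + b) b
decreasing_by all_goals omega

-- max(fusc(i) for i in range(n+1)) ((max?).getD 0: Pre_ makes the range nonempty)
def maxi_generate_alt (n : Int) : Int :=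
  (PySem.List.max? ((PySem.List.pyRange 0 (n + 1) 1).map (fun i => fuscGo i.toNat 1 0))
    (fun x => x)).getD 0

-- ===== PRECONDITION & SPEC =====
-- A raises IndexError for n < 0 ([0]*(n+1) is too short for array[1]=1); B raises ValueError
-- there (max of an empty generator); Pre_ excludes exactly those inputs.
def Pre_maxi_generate (n : Int) : Prop := 0 ≤ n
instance (n : Int) : Decidable (Pre_maxi_generate n) := by unfold Pre_maxi_generate; infer_instance
def pvWitness_maxi_generate : Int := (5)

def Spec_maxi_generate (n : Int) (out : Int) : Prop := out = maxi_generate_alt n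
instance (n : Int) (out : Int) : Decidable (Spec_maxi_generate n out) := by unfold Spec_maxi_generate; infer_instance

-- ===== CLAIM (what is proved, stated in full; the proofs are below) =====
def Claim_equal_maxi_generate : Prop := ∀ (n : Int), Dom_maxi_generate n → Pre_maxi_generate n → Spec_maxi_generate n (maxi_generate n)

-- ===== LEMMAS AND PROOFS =====

-- Stern's diatomic sequence, the common mathematical description of both programs' values.
def stern : Nat → Int
  | 0 => 0
  | 1 => 1
  | (k + 2) =>
      if (k + 2) % 2 = 0 then stern ((k + 2) / 2)
      else stern ((k + 2) / 2) + stern ((k + 2) / 2 + 1)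
decreasing_by all_goals omega

theorem stern_two_mul (m : Nat) : stern (2 * m) = stern m := by
  match m with
  | 0 => rfl
  | (m + 1) =>
      show stern (2 * m + 2) = stern (m + 1)
      rw [stern]
      have h1 : (2 * m + 2) % 2 = 0 := by omega
      have h2 : (2 * m + 2) / 2 = m + 1 := by omega
      rw [h1, h2]
      norm_num

theorem stern_two_mul_add_one (m : Nat) : stern (2 * m + 1) = stern m + stern (m + 1) := by
  match m with
  | 0 => simp [stern]
  | (m + 1) =>
      show stern (2 * m + 1 + 2) = stern (m + 1) + stern (m + 2)
      rw [stern]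
      have h1 : (2 * m + 1 + 2) % 2 = 1 := by omega
      have h2 : (2 * m + 1 + 2) / 2 = m + 1 := by omega
      rw [h1, h2]
      norm_num

theorem fuscGo_eq (k : Nat) : ∀ a b : Int, fuscGo k a b = a * stern k + b * stern (k + 1) := by
  induction k using Nat.strong_induction_on with
  | _ k ih =>
    match k with
    | 0 => intro a b; simp [fuscGo, stern]
    | (k + 1) =>
      intro a b
      rw [fuscGo]
      by_cases h : (k + 1) % 2 = 1
      · rw [if_pos h, ih ((k + 1) / 2) (by omega)]
        obtain ⟨m, hm⟩ : ∃ m, k + 1 = 2 * m + 1 := ⟨(k + 1) / 2, by omega⟩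
        have hd : (k + 1) / 2 = m := by omega
        rw [hd, hm, stern_two_mul_add_one m]
        have : 2 * m + 1 + 1 = 2 * (m + 1) := by ring
        rw [this, stern_two_mul (m + 1)]
        ring
      · rw [if_neg h, ih ((k + 1) / 2) (by omega)]
        obtain ⟨m, hm⟩ : ∃ m, k + 1 = 2 * m := ⟨(k + 1) / 2, by omega⟩
        have hd : (k + 1) / 2 = m := by omega
        rw [hd, hm, stern_two_mul m]
        have : 2 * m + 1 = 2 * m + 1 := rfl
        rw [stern_two_mul_add_one m]
        ring

theorem fusc_eq_stern (k : Nat) : fuscGo k 1 0 = stern k := by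
  rw [fuscGo_eq]; ring

-- the loop body of A (its two conditional writes), specialised to a Nat loop index
def sternStep1 (n : Int) (arr : List Int) (i : Int) : List Int :=
  if i * 2 ≤ n then PySem.List.pySetD arr (i * 2) (PySem.List.pyGetD arr i 0) else arr

def sternStep2 (n : Int) (arr : List Int) (i : Int) : List Int :=
  if i * 2 + 1 ≤ n then
    PySem.List.pySetD arr (i * 2 + 1)
      (PySem.List.pyGetD arr i 0 + PySem.List.pyGetD arr (i + 1) 0) else arr

def sternStep (n : Int) (arr : List Int) (k : Nat) : List Int :=
  sternStep2 n (sternStep1 n arr (k : Int)) (k : Int)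

-- the same body on the port's Array state (defeq to the fold body of maxi_generate)
def sternStepA1 (n : Int) (arr : Array Int) (i : Int) : Array Int :=
  if i * 2 ≤ n then arr.setIfInBounds (i * 2).toNat (arr.getD i.toNat 0) else arr

def sternStepA2 (n : Int) (arr : Array Int) (i : Int) : Array Int :=
  if i * 2 + 1 ≤ n then
    arr.setIfInBounds (i * 2 + 1).toNat
      (arr.getD i.toNat 0 + arr.getD (i + 1).toNat 0) else arr

def sternStepA (n : Int) (arr : Array Int) (k : Nat) : Array Int :=
  sternStepA2 n (sternStepA1 n arr (k : Int)) (k : Int)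

theorem arr_getD_toList (a : Array Int) (i : Nat) : a.getD i 0 = a.toList.getD i 0 := by
  simp [List.getD, Array.getD_eq_getD_getElem?, Array.getElem?_toList]

theorem toList_sternStepA1 (n : Int) (a : Array Int) (k : Nat) :
    (sternStepA1 n a (k : Int)).toList = sternStep1 n a.toList (k : Int) := by
  unfold sternStepA1 sternStep1
  split_ifs with h
  · rw [show ((k : Int) * 2).toNat = 2 * k from by omega,
      show ((k : Int)).toNat = k from by omega,
      Array.toList_setIfInBounds,
      show (k : Int) * 2 = ((2 * k : Nat) : Int) from by push_cast; ring,
      PySem.List.pySetD_natCast, PySem.List.pyGetD_natCast, arr_getD_toList]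
  · rfl

theorem toList_sternStepA2 (n : Int) (a : Array Int) (k : Nat) :
    (sternStepA2 n a (k : Int)).toList = sternStep2 n a.toList (k : Int) := by
  unfold sternStepA2 sternStep2
  split_ifs with h
  · rw [show ((k : Int) * 2 + 1).toNat = 2 * k + 1 from by omega,
      show ((k : Int)).toNat = k from by omega,
      show ((k : Int) + 1).toNat = k + 1 from by omega,
      Array.toList_setIfInBounds,
      show (k : Int) * 2 + 1 = ((2 * k + 1 : Nat) : Int) from by push_cast; ring,
      PySem.List.pySetD_natCast, PySem.List.pyGetD_natCast,
      show ((k : Int)) + 1 = ((k + 1 : Nat) : Int) from by push_cast; ring,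
      PySem.List.pyGetD_natCast, arr_getD_toList, arr_getD_toList]
  · rfl

theorem toList_sternStepA (n : Int) (a : Array Int) (k : Nat) :
    (sternStepA n a k).toList = sternStep n a.toList k := by
  unfold sternStepA sternStep
  rw [toList_sternStepA2, toList_sternStepA1]

theorem toList_foldl_sternStepA (n : Int) (l : List Nat) (a : Array Int) :
    (l.foldl (sternStepA n) a).toList = l.foldl (sternStep n) a.toList := by
  induction l generalizing a with
  | nil => rfl
  | cons x t ih => rw [List.foldl_cons, List.foldl_cons, ih, toList_sternStepA]

-- invariant: length preserved and the first min(N+1, 2k) entries are the Stern values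
def SternInv (N k : Nat) (arr : List Int) : Prop :=
  arr.length = N + 1 ∧ ∀ j : Nat, j < N + 1 → j < 2 * k → arr.getD j 0 = stern j

theorem getD_set_eq (l : List Int) (i : Nat) (v : Int) (h : i < l.length) :
    (l.set i v).getD i 0 = v := by
  simp [List.getD, h]

theorem getD_set_ne (l : List Int) (i j : Nat) (v : Int) (h : j ≠ i) :
    (l.set i v).getD j 0 = l.getD j 0 := by
  simp [List.getD, h.symm]

theorem sternStep_inv (n : Int) (N k : Nat) (hn : n = (N : Int)) (_hN : 1 ≤ N) (hk : 1 ≤ k)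
    (arr : List Int) (h : SternInv N k arr) : SternInv N (k + 1) (sternStep n arr k) := by
  obtain ⟨hlen, hpre⟩ := h
  unfold sternStep sternStep1 sternStep2
  by_cases h2k : 2 * k ≤ N
  · -- first write happens
    have hle : (k : Int) * 2 ≤ n := by rw [hn]; omega
    rw [if_pos hle]
    have hc2 : (k : Int) * 2 = ((2 * k : Nat) : Int) := by push_cast; ring
    have hget_k : PySem.List.pyGetD arr (k : Int) 0 = stern k := by
      rw [PySem.List.pyGetD_natCast]; exact hpre k (by omega) (by omega)
    rw [hc2, PySem.List.pySetD_natCast, hget_k]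
    set arr' := arr.set (2 * k) (stern k) with harr'
    have hlen' : arr'.length = N + 1 := by simp [harr', hlen]
    have harr'_2k : arr'.getD (2 * k) 0 = stern (2 * k) := by
      rw [getD_set_eq _ _ _ (by omega), stern_two_mul]
    have harr'_lt : ∀ j : Nat, j < N + 1 → j < 2 * k → arr'.getD j 0 = stern j := by
      intro j hj1 hj2
      rw [getD_set_ne _ _ _ _ (by omega)]; exact hpre j hj1 hj2
    by_cases h2k1 : 2 * k + 1 ≤ N
    · have hle1 : ((2 * k : Nat) : Int) + 1 ≤ n := by rw [hn]; omega
      rw [if_pos hle1]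
      have hc21 : ((2 * k : Nat) : Int) + 1 = ((2 * k + 1 : Nat) : Int) := by push_cast; ring
      have hget'_k : PySem.List.pyGetD arr' (k : Int) 0 = stern k := by
        rw [PySem.List.pyGetD_natCast]
        rw [getD_set_ne _ _ _ _ (by omega)]
        exact hpre k (by omega) (by omega)
      have hc1 : (k : Int) + 1 = ((k + 1 : Nat) : Int) := by push_cast; ring
      have hget'_k1 : PySem.List.pyGetD arr' ((k : Int) + 1) 0 = stern (k + 1) := by
        rw [hc1, PySem.List.pyGetD_natCast]
        by_cases hk1 : k = 1
        · subst hk1; exact harr'_2k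
        · rw [getD_set_ne _ _ _ _ (by omega)]
          exact hpre (k + 1) (by omega) (by omega)
      rw [hc21, PySem.List.pySetD_natCast, hget'_k, hget'_k1]
      refine ⟨by simp [hlen'], ?_⟩
      intro j hj1 hj2
      by_cases hje : j = 2 * k + 1
      · subst hje
        rw [getD_set_eq _ _ _ (by omega), stern_two_mul_add_one]
      · rw [getD_set_ne _ _ _ _ hje]
        by_cases hje2 : j = 2 * k
        · subst hje2; exact harr'_2k
        · exact harr'_lt j hj1 (by omega)
    · have hle1 : ¬ (((2 * k : Nat) : Int) + 1 ≤ n) := by rw [hn]; omega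
      rw [if_neg hle1]
      refine ⟨hlen', ?_⟩
      intro j hj1 hj2
      by_cases hje2 : j = 2 * k
      · subst hje2; exact harr'_2k
      · exact harr'_lt j hj1 (by omega)
  · -- 2k > N: both writes skipped, prefix already covers everything
    have hle : ¬ ((k : Int) * 2 ≤ n) := by rw [hn]; omega
    have hle1 : ¬ ((k : Int) * 2 + 1 ≤ n) := by rw [hn]; omega
    rw [if_neg hle, if_neg hle1]
    exact ⟨hlen, fun j hj1 _ => hpre j hj1 (by omega)⟩

-- the state after the first iteration (i = 0), for n = N ≥ 1
theorem sternStep_zero (n : Int) (N : Nat) (hn : n = (N : Int)) (hN : 1 ≤ N) :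
    SternInv N 1 (sternStep n (PySem.List.pySetD (List.replicate (N + 1) 0) 1 1) 0) := by
  unfold sternStep sternStep1 sternStep2
  have h0 : ((0 : Nat) : Int) * 2 ≤ n := by rw [hn]; omega
  rw [if_pos h0]
  have hrep : PySem.List.pySetD (List.replicate (N + 1) (0 : Int)) 1 1
      = (List.replicate (N + 1) (0 : Int)).set 1 1 := by
    rw [show (1 : Int) = ((1 : Nat) : Int) from rfl, PySem.List.pySetD_natCast]
  rw [hrep]
  set base := (List.replicate (N + 1) (0 : Int)).set 1 1 with hbase
  have hlenb : base.length = N + 1 := by simp [hbase]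
  have hb0 : base.getD 0 0 = 0 := by
    rw [getD_set_ne _ _ _ _ (by omega)]
    simp [List.getD]
  have hb1 : base.getD 1 0 = 1 := by
    apply getD_set_eq
    simp only [List.length_replicate]
    omega
  have hc0 : ((0 : Nat) : Int) * 2 = ((0 : Nat) : Int) := by norm_num
  have hget0 : PySem.List.pyGetD base ((0 : Nat) : Int) 0 = 0 := by
    rw [PySem.List.pyGetD_natCast]; exact hb0
  rw [hc0, PySem.List.pySetD_natCast, hget0]
  set arr' := base.set 0 0 with harr'
  have hlen' : arr'.length = N + 1 := by simp [harr', hlenb]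
  have h1 : ((0 : Nat) : Int) + 1 ≤ n := by rw [hn]; omega
  rw [if_pos h1]
  have hget'_0 : PySem.List.pyGetD arr' ((0 : Nat) : Int) 0 = 0 := by
    rw [PySem.List.pyGetD_natCast, harr', getD_set_eq _ _ _ (by rw [hlenb]; omega)]
  have hget'_1 : PySem.List.pyGetD arr' ((1 : Nat) : Int) 0 = 1 := by
    rw [PySem.List.pyGetD_natCast, harr', getD_set_ne _ _ _ _ (by omega)]
    exact hb1
  rw [show ((0 : Nat) : Int) + 1 = ((1 : Nat) : Int) from rfl, PySem.List.pySetD_natCast,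
    hget'_0, hget'_1]
  refine ⟨by simp [hlen'], ?_⟩
  intro j hj1 hj2
  interval_cases j
  · rw [getD_set_ne _ _ _ _ (by omega), harr', getD_set_eq _ _ _ (by rw [hlenb]; omega)]
    norm_num [stern]
  · rw [getD_set_eq _ _ _ (by rw [List.length_set, hlenb]; omega)]
    norm_num [stern]

theorem sternInv_foldl (n : Int) (N : Nat) (hn : n = (N : Int)) (hN : 1 ≤ N) (k : Nat) (hk : 1 ≤ k) :
    SternInv N k ((List.range k).foldl (sternStep n)
      (PySem.List.pySetD (List.replicate (N + 1) 0) 1 1)) := by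
  induction k with
  | zero => omega
  | succ k ih =>
    rw [List.range_succ, List.foldl_append, List.foldl_cons, List.foldl_nil]
    by_cases hk1 : 1 ≤ k
    · exact sternStep_inv n N k hn hN hk1 _ (ih hk1)
    · have hk0 : k = 0 := by omega
      subst hk0
      simpa using sternStep_zero n N hn hN

theorem getD_eq_map_stern (N : Nat) (arr : List Int) (h : SternInv N (N + 1) arr) :
    arr = (List.range (N + 1)).map stern := by
  obtain ⟨hlen, hpre⟩ := h
  apply List.ext_getElem
  · simp [hlen]
  · intro j hj1 hj2
    have hj : j < N + 1 := by simpa [hlen] using hj1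
    have := hpre j hj (by omega)
    rw [List.getD_eq_getElem?_getD, List.getElem?_eq_getElem hj1] at this
    simpa [hj] using this

-- ===== VERDICT (by name: the statement is the Claim_ definition above) =====
theorem maxi_generate_spec : Claim_equal_maxi_generate := by
  intro n _ hpre
  have hge : (0 : Int) ≤ n := hpre
  unfold Spec_maxi_generate maxi_generate maxi_generate_alt
  by_cases h0 : n = 0
  · subst h0
    rw [if_pos rfl, show PySem.List.pyRange 0 (0 + 1) 1 = [(0 : Int)] from rfl]
    simp [fuscGo, PySem.List.max?_id_cons]
  · rw [if_neg h0]
    obtain ⟨N, hn, hN1⟩ : ∃ N : Nat, n = (N : Int) ∧ 1 ≤ N := ⟨n.toNat, by omega, by omega⟩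
    have hrange : PySem.List.pyRange 0 (n + 1) 1
        = (List.range (N + 1)).map (fun k : Nat => (k : Int)) := by
      rw [PySem.List.pyRange_one, show (n + 1 - 0).toNat = N + 1 from by omega]
      exact List.map_congr_left (fun k _ => by ring_nf)
    show (PySem.List.max? (((PySem.List.pyRange 0 (n + 1) 1).foldl
        (fun arr i => sternStepA2 n (sternStepA1 n arr i) i)
        ((Array.replicate (n + 1).toNat 0).setIfInBounds 1 1)).toList) (fun x => x)).getD 0
      = (PySem.List.max? ((PySem.List.pyRange 0 (n + 1) 1).map
          (fun i => fuscGo i.toNat 1 0)) (fun x => x)).getD 0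
    rw [hrange, show (n + 1).toNat = N + 1 from by omega, List.foldl_map]
    have hfold : ((List.range (N + 1)).foldl
        (fun (arr : Array Int) (k : Nat) => sternStepA2 n (sternStepA1 n arr (k : Int)) (k : Int))
        ((Array.replicate (N + 1) 0).setIfInBounds 1 1)).toList
        = (List.range (N + 1)).foldl (sternStep n)
          ((Array.replicate (N + 1) (0 : Int)).setIfInBounds 1 1).toList :=
      toList_foldl_sternStepA n (List.range (N + 1)) _
    rw [hfold]
    have hinit : ((Array.replicate (N + 1) (0 : Int)).setIfInBounds 1 1).toList
        = PySem.List.pySetD (List.replicate (N + 1) 0) 1 1 := by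
      rw [Array.toList_setIfInBounds, Array.toList_replicate,
        show (1 : Int) = ((1 : Nat) : Int) from rfl, PySem.List.pySetD_natCast]
    rw [hinit,
      getD_eq_map_stern N _ (sternInv_foldl n N hn hN1 (N + 1) (by omega)), List.map_map]
    have hmap : ((fun i : Int => fuscGo i.toNat 1 0) ∘ fun k : Nat => (k : Int)) = stern := by
      funext k
      simp [Function.comp, fusc_eq_stern]
    rw [hmap]
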